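-- pv_equiv track=rewrite | github.com/oneisnot/ruichangmj | test_scoring.py | count_xiaosa
-- ===== SOURCE A (Python) =====
-- from collections import Counter
--
-- ZHONG = 27
--
-- def count_xiaosa(hand, melds, is_seven_pairs_flag, is_peng_peng_hu_flag):
--     """计算潇洒（滚）次数"""
--     gun_count = 0
--     if is_seven_pairs_flag:
--         t_set = sorted([t for t, count in Counter(hand).items() if count >= 2])
--         # 找顺连对子，比如 11 22, 实际上只要 t_set 中有连续相邻牌且同花色即可
--         i = 0
--         while i < len(t_set) - 1:
--             if t_set[i] < ZHONG and t_set[i+1] == t_set[i] + 1 and t_set[i]//9 == t_set[i+1]//9: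
--                 gun_count += 1
--             i += 1
--
--     if is_peng_peng_hu_flag:
--         # 只计算明/暗杠！碰牌不算。
--         gangs = sorted([m[1] for m in melds if m[0] == "KONG"])
--         i = 0
--         while i < len(gangs) - 1:
--             if gangs[i] < ZHONG and gangs[i+1] == gangs[i] + 1 and gangs[i]//9 == gangs[i+1]//9:
--                 gun_count += 1
--             i += 1
--
--     return gun_count
-- ===== SOURCE B (Python) =====
-- from collections import Counter
--
-- ZHONG = 27
--
-- def count_xiaosa(hand, melds, is_seven_pairs_flag, is_peng_peng_hu_flag):
--     """计算潇洒（滚）次数 — set-membership probes instead of sort + adjacent scan"""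
--     def consec(values):
--         s = set(values)
--         return sum(1 for v in s
--                    if v < ZHONG and (v + 1) in s and v // 9 == (v + 1) // 9)
--
--     gun_count = 0
--     if is_seven_pairs_flag:
--         gun_count += consec(t for t, c in Counter(hand).items() if c >= 2)
--     if is_peng_peng_hu_flag:
--         gun_count += consec(m[1] for m in melds if m[0] == "KONG")
--     return gun_count
-- ===== Notes on version B (the rewrite author's own statement) =====
-- stated objective: alternative
-- what changed: Replaces the sort-then-adjacent-index scan in both blocks with a set of the candidate tiles and counts values v with v+1 also in the set, eliminating the sort and the index pairing loop.
import Mathlib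
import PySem

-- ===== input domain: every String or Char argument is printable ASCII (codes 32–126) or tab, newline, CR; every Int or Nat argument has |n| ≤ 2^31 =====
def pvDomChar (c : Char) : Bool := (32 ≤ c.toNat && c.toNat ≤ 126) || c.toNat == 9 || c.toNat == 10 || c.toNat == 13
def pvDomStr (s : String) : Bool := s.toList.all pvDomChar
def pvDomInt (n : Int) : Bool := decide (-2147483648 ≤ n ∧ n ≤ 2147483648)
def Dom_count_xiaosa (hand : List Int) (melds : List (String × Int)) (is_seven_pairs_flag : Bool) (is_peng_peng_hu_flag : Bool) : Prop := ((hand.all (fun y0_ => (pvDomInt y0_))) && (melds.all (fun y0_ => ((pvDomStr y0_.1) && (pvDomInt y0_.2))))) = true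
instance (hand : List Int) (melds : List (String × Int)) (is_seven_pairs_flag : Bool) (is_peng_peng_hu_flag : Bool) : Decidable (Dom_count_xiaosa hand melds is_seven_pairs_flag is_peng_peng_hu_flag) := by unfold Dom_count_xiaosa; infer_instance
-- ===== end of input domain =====

-- B replaces A's sort + adjacent-index while-loop (per block) by a set of the candidate
-- tiles and counts values v with v+1 also in the set; same result, no sort, no index scan.

-- ===== PORT A =====
-- the guard of A's while-loop body: t_set[i] < 27 and t_set[i+1] == t_set[i]+1 and t_set[i]//9 == t_set[i+1]//9
def pvCondA (a b : Int) : Bool :=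
  decide (a < 27) && decide (b = a + 1) && decide (PySem.Int.floordiv a 9 = PySem.Int.floordiv b 9)

-- A's 'i = 0; while i < len(l) - 1: …; i += 1' as a fold over range(0, len(l)-1);
-- the indices read are always in range, so l[i] is pyGetD (default irrelevant) — exact.
def pvWhileA (l : List Int) (gun : Int) : Int :=
  (PySem.List.pyRange 0 (PySem.List.len l - 1) 1).foldl
    (fun g i => if pvCondA (PySem.List.pyGetD l i 0) (PySem.List.pyGetD l (i + 1) 0) then g + 1 else g) gun

def count_xiaosa (hand : List Int) (melds : List (String × Int)) (is_seven_pairs_flag : Bool) (is_peng_peng_hu_flag : Bool) : Int :=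
  let gun0 : Int := 0
  let gun1 : Int :=
    if is_seven_pairs_flag then
      let t_set := PySem.List.sorted (((PySem.Dict.counter hand).items.filter (fun tc => decide (2 ≤ tc.2))).map (·.1)) (fun x => x) false
      pvWhileA t_set gun0
    else gun0
  let gun2 : Int :=
    if is_peng_peng_hu_flag then
      let gangs := PySem.List.sorted ((melds.filter (fun m => m.1 == "KONG")).map (·.2)) (fun x => x) false
      pvWhileA gangs gun1
    else gun1
  gun2

-- ===== PORT B =====
-- B's consec: build the set once, then sum(1 for v in s if v < 27 and v+1 in s and v//9 == (v+1)//9)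
def pvConsecAlt (s : PySem.Set Int) : Int :=
  s.foldl
    (fun g v =>
      if decide (v < 27) && PySem.Set.contains s (v + 1) && decide (PySem.Int.floordiv v 9 = PySem.Int.floordiv (v + 1) 9)
      then g + 1 else g) 0

def count_xiaosa_alt (hand : List Int) (melds : List (String × Int)) (is_seven_pairs_flag : Bool) (is_peng_peng_hu_flag : Bool) : Int :=
  let g1 : Int :=
    if is_seven_pairs_flag then
      pvConsecAlt (PySem.Set.ofList (((PySem.Dict.counter hand).items.filter (fun tc => decide (2 ≤ tc.2))).map (·.1)))
    else 0
  let g2 : Int :=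
    if is_peng_peng_hu_flag then
      pvConsecAlt (PySem.Set.ofList ((melds.filter (fun m => m.1 == "KONG")).map (·.2)))
    else 0
  g1 + g2

-- ===== PRECONDITION & SPEC =====
def Spec_count_xiaosa (hand : List Int) (melds : List (String × Int)) (is_seven_pairs_flag : Bool) (is_peng_peng_hu_flag : Bool) (out : Int) : Prop := out = count_xiaosa_alt hand melds is_seven_pairs_flag is_peng_peng_hu_flag
instance (hand : List Int) (melds : List (String × Int)) (is_seven_pairs_flag : Bool) (is_peng_peng_hu_flag : Bool) (out : Int) : Decidable (Spec_count_xiaosa hand melds is_seven_pairs_flag is_peng_peng_hu_flag out) := by unfold Spec_count_xiaosa; infer_instance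

-- ===== CLAIM (what is proved, stated in full; the proofs are below) =====
def Claim_equal_count_xiaosa : Prop := ∀ (hand : List Int) (melds : List (String × Int)) (is_seven_pairs_flag : Bool) (is_peng_peng_hu_flag : Bool), Dom_count_xiaosa hand melds is_seven_pairs_flag is_peng_peng_hu_flag → Spec_count_xiaosa hand melds is_seven_pairs_flag is_peng_peng_hu_flag (count_xiaosa hand melds is_seven_pairs_flag is_peng_peng_hu_flag)

-- ===== LEMMAS AND PROOFS =====

-- adjacent-pair count of a list (what A's while loop computes on the sorted list)
def pvAdjCnt : List Int → Nat
  | x :: y :: r => (if pvCondA x y then 1 else 0) + pvAdjCnt (y :: r)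
  | _ => 0

-- keep-last dedup, a convenient nodup representative of a list's element set
def pvDD : List Int → List Int
  | [] => []
  | x :: t => if x ∈ t then pvDD t else x :: pvDD t

-- B's predicate, phrased on plain membership in a list l
def pvPredM (l : List Int) (v : Int) : Bool :=
  decide (v < 27) && decide ((v + 1) ∈ l) && decide (PySem.Int.floordiv v 9 = PySem.Int.floordiv (v + 1) 9)

theorem pvDD_mem (l : List Int) (v : Int) : v ∈ pvDD l ↔ v ∈ l := by
  induction l with
  | nil => simp [pvDD]
  | cons x t ih =>
    by_cases hx : x ∈ t
    · rw [pvDD]; simp only [hx, if_true]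
      rw [ih, List.mem_cons]
      constructor
      · exact Or.inr
      · rintro (rfl | h)
        · exact hx
        · exact h
    · rw [pvDD]; simp only [hx, if_false]
      simp [ih]

theorem pvDD_nodup (l : List Int) : (pvDD l).Nodup := by
  induction l with
  | nil => simp [pvDD]
  | cons x t ih =>
    by_cases hx : x ∈ t
    · rw [pvDD]; simp only [hx, if_true]; exact ih
    · rw [pvDD]; simp only [hx, if_false]
      exact List.Nodup.cons (by simpa [pvDD_mem] using hx) ih

-- the Nat-indexed form of A's while loop: count over the index range = adjacent-pair count
theorem pvCntNat (l : List Int) :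
    (List.range (l.length - 1)).countP (fun k => pvCondA (l.getD k 0) (l.getD (k + 1) 0))
      = pvAdjCnt l := by
  induction l with
  | nil => simp [pvAdjCnt]
  | cons x t ih =>
    cases t with
    | nil => simp [pvAdjCnt]
    | cons y r =>
      have hlen2 : (x :: y :: r).length - 1 = ((y :: r).length - 1) + 1 := by
        simp
      rw [hlen2, List.range_succ_eq_map, List.countP_cons, List.countP_map]
      have hsh : ∀ k ∈ List.range ((y :: r).length - 1),
          ((fun k => pvCondA ((x :: y :: r).getD k 0) ((x :: y :: r).getD (k + 1) 0)) ∘ Nat.succ) k = true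
          ↔ (fun k => pvCondA ((y :: r).getD k 0) ((y :: r).getD (k + 1) 0)) k = true := by
        intro k _
        simp [Function.comp]
      rw [List.countP_congr hsh, ih]
      simp [pvAdjCnt, Nat.add_comm]

-- A's index loop over the range = the adjacent-pair count
theorem pvWhileA_eq_adj (l : List Int) (gun : Int) :
    pvWhileA l gun = gun + (pvAdjCnt l : Int) := by
  unfold pvWhileA
  rw [PySem.List.foldl_count_if
    (fun i => pvCondA (PySem.List.pyGetD l i 0) (PySem.List.pyGetD l (i + 1) 0))]
  congr 1
  rw [PySem.List.pyRange_one, List.countP_map]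
  have hlen : (PySem.List.len l - 1 - 0).toNat = l.length - 1 := by
    simp [PySem.List.len_eq]
  rw [hlen]
  have hpt : ∀ k ∈ List.range (l.length - 1),
      ((fun i => pvCondA (PySem.List.pyGetD l i 0) (PySem.List.pyGetD l (i + 1) 0))
        ∘ fun k : Nat => (0 : Int) + (k : Int)) k = true
      ↔ (fun k => pvCondA (l.getD k 0) (l.getD (k + 1) 0)) k = true := by
    intro k _
    show pvCondA (PySem.List.pyGetD l ((0 : Int) + (k : Int)) 0)
        (PySem.List.pyGetD l ((0 : Int) + (k : Int) + 1) 0) = true ↔ _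
    have e1 : (0 : Int) + (k : Int) = ((k : Nat) : Int) := by omega
    rw [e1]
    have e2 : ((k : Int) + 1) = (((k + 1 : Nat)) : Int) := by omega
    rw [e2, PySem.List.pyGetD_natCast, PySem.List.pyGetD_natCast]
  rw [List.countP_congr hpt, pvCntNat]

-- the combinatorial core: on a ≤-sorted list, the number of adjacent +1 transitions
-- equals the number of distinct values v with v+1 also present
theorem pvAdj_eq_set (l : List Int) (hs : l.Pairwise (· ≤ ·)) :
    pvAdjCnt l = (pvDD l).countP (pvPredM l) := by
  induction l with
  | nil => simp [pvAdjCnt, pvDD]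
  | cons x t ih =>
    cases t with
    | nil =>
      simp [pvAdjCnt, pvDD, pvPredM]
    | cons y r =>
      have hpt : (y :: r).Pairwise (· ≤ ·) := hs.tail
      have hx_le : ∀ b ∈ y :: r, x ≤ b := fun b hb => (List.pairwise_cons.mp hs).1 b hb
      have hy_le : ∀ b ∈ r, y ≤ b := fun b hb => (List.pairwise_cons.mp hpt).1 b hb
      by_cases hxy : x = y
      · -- duplicate head: the transition x→y cannot fire (y = x ≠ x+1), and x adds nothing new
        subst hxy
        have hcond : pvCondA x x = false := by simp [pvCondA]
        have hadj : pvAdjCnt (x :: x :: r) = pvAdjCnt (x :: r) := by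
          simp [pvAdjCnt, hcond]
        rw [hadj]
        have hdd : pvDD (x :: x :: r) = pvDD (x :: r) := by
          simp [pvDD]
        rw [hdd]
        have hpx : (x :: r).Pairwise (· ≤ ·) := hpt
        rw [ih hpx]
        apply List.countP_congr
        intro v _
        simp [pvPredM]
      · -- strictly increasing step: x < y, so x ∉ y :: r and x+1 ∈ l ↔ y = x+1
        have hxlty : x < y := lt_of_le_of_ne (hx_le y (by simp)) hxy
        have hxnot : x ∉ (y :: r) := by
          intro hmem
          rcases List.mem_cons.mp hmem with h | h
          · omega
          · have := hy_le _ h; omega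
        have hdd : pvDD (x :: y :: r) = x :: pvDD (y :: r) := by
          simp [pvDD, hxnot]
        have hsucc : ((x + 1) ∈ (x :: y :: r)) ↔ y = x + 1 := by
          constructor
          · intro hmem
            rcases List.mem_cons.mp hmem with h | hmem
            · omega
            · rcases List.mem_cons.mp hmem with h | hmem
              · omega
              · have := hy_le _ hmem; omega
          · intro h; simp [h]
        have hheads : (if pvCondA x y then 1 else 0) = (if pvPredM (x :: y :: r) x then 1 else 0) := by
          by_cases hy1 : y = x + 1
          · subst hy1
            simp [pvCondA, pvPredM, hsucc]
          · have hnm : (x + 1) ∉ (x :: y :: r) := fun h => hy1 (hsucc.mp h)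
            simp [pvCondA, pvPredM, hnm, hy1]
        have htail : ∀ v ∈ pvDD (y :: r),
            pvPredM (y :: r) v = true ↔ pvPredM (x :: y :: r) v = true := by
          intro v hv
          have hvmem : v ∈ (y :: r) := (pvDD_mem _ _).mp hv
          have hvx : x < v := lt_of_lt_of_le hxlty (by
            rcases List.mem_cons.mp hvmem with h | h
            · omega
            · exact hy_le _ h)
          have hm : ((v + 1) ∈ (x :: y :: r)) ↔ ((v + 1) ∈ (y :: r)) := by
            simp only [List.mem_cons]
            constructor
            · rintro (h | h)
              · omega
              · exact h
            · intro h; exact Or.inr h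
          simp [pvPredM, hm]
        have hadj : pvAdjCnt (x :: y :: r) = (if pvCondA x y then 1 else 0) + pvAdjCnt (y :: r) := rfl
        rw [hadj, hdd, List.countP_cons, ih hpt, List.countP_congr htail, hheads, Nat.add_comm]

-- B's consec over set(vals) counts exactly pvPredM vals over the deduplicated elements
theorem pvConsecAlt_eq_countP (vals : List Int) :
    pvConsecAlt (PySem.Set.ofList vals)
      = ((PySem.Set.ofList vals).countP (pvPredM vals) : Int) := by
  unfold pvConsecAlt
  rw [PySem.List.foldl_count_if
    (fun v => decide (v < 27) && PySem.Set.contains (PySem.Set.ofList vals) (v + 1)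
      && decide (PySem.Int.floordiv v 9 = PySem.Int.floordiv (v + 1) 9))]
  rw [zero_add]
  congr 1
  apply List.countP_congr
  intro v _
  have hc : PySem.Set.contains (PySem.Set.ofList vals) (v + 1) = decide ((v + 1) ∈ vals) := by
    simp [PySem.Set.contains, PySem.Set.mem_ofList]
  rw [pvPredM, hc]

-- one block: A's sort + while-scan started at gun equals gun + B's consec of the set
theorem pvBlock_eq (vals : List Int) (gun : Int) :
    pvWhileA (PySem.List.sorted vals (fun x => x) false) gun
      = gun + pvConsecAlt (PySem.Set.ofList vals) := by
  set l := PySem.List.sorted vals (fun x => x) false with hl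
  rw [pvWhileA_eq_adj, pvAdj_eq_set l (by simpa [hl] using PySem.List.sorted_pairwise vals (fun x => x)),
    pvConsecAlt_eq_countP]
  congr 1
  have hperm : (pvDD l).Perm (PySem.Set.ofList vals) := by
    rw [List.perm_ext_iff_of_nodup (pvDD_nodup l) (PySem.Set.nodup_ofList vals)]
    intro v
    rw [pvDD_mem, PySem.Set.mem_ofList, hl, PySem.List.mem_sorted]
  have hpred : ∀ v ∈ pvDD l, pvPredM l v = true ↔ pvPredM vals v = true := by
    intro v _
    simp [pvPredM, hl, PySem.List.mem_sorted]
  rw [List.countP_congr hpred, hperm.countP_eq]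

-- ===== VERDICT (by name: the statement is the Claim_ definition above) =====
theorem count_xiaosa_spec : Claim_equal_count_xiaosa := by
  intro hand melds f1 f2 _
  unfold Spec_count_xiaosa count_xiaosa count_xiaosa_alt
  cases f1 <;> cases f2 <;> simp [pvBlock_eq]
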